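-- pv_equiv track=rewrite | github.com/AnuragRai017/jira-auto | allowed_reporters.py | is_allowed_reporter
-- ===== SOURCE A (Python) =====
-- ALLOWED_REPORTERS = [
--     # Elevance-Carelon
--     'Kelli-Ann.Bailey@carelon.com',
--
--     # FCHN (First Choice Health Network)
--     'Cindy Bergley',
--     'cbergley',  # Jira username for Cindy Bergley
--     'Abby Fuller',
--     'Tanya Ramirez',
--     'Steffany Taylor',
--
--     # Premera
--     'credentialing.updates@premera.com',
--
--     # Headway
--     'edna.villareal@findheadway.com',
--     'luis.valdez@findheadway.com',
--     'katie.cassidy@findheadway.com',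
--     'stephani.vasquez@findheadway.com',
--     'gavin.green@findheadway.com',
--     'valorie.reyes@findheadway.com',
--     'amy.huh@findheadway.com',
--     'Zara Aghajanyan',
--
--     # SCAN
--     'c.smith@scanhealthplan.com',
--     'b.chan@scanhealthplan.com',
--     'li.lopez@scanhealthplan.com',
--     'a.liu@scanhealthplan.com',
--     'EVo@scanhealthplan.com',
--     'a.vuc@scanhealthplan.com',
--     'mo.davila@scanhealthplan.com',
--     'Carrie Black',
--
--     # University of Utah Health Plan
--     'Charlene Frail-McGeever',
--     'Aimee.Kulp@hsc.utah.edu'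
-- ]
--
-- ALLOWED_DOMAINS = [
--     'carelon.com',
--     'findheadway.com',
--     'headway.com',
--     'scanhealthplan.com',
--     'scan.com',
--     'hsc.utah.edu',
--     'utah.edu',
--     'fchn.com',
--     'firstchoicehealth.com',
--     'premera.com',
-- ]
--
-- def is_allowed_reporter(email=None, name=None):
--     """
--     Check if a reporter is allowed based on email or name
--
--     Args:
--         email: Reporter's email address
--         name: Reporter's display name
--
--     Returns:
--         bool: True if the reporter is allowed, False otherwise
--     """
--     # Check if either email or name is in the allowed list
--     if email and email.lower() in [r.lower() for r in ALLOWED_REPORTERS]: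
--         return True
--
--     if name and name.lower() in [r.lower() for r in ALLOWED_REPORTERS]:
--         return True
--
--     # Check if email domain is allowed
--     if email:
--         for domain in ALLOWED_DOMAINS:
--             if email.lower().endswith('@' + domain.lower()):
--                 return True
--
--     return False
-- ===== SOURCE B (Python) =====
-- ALLOWED_REPORTERS = [
--     'Kelli-Ann.Bailey@carelon.com',
--     'Cindy Bergley',
--     'cbergley',
--     'Abby Fuller',
--     'Tanya Ramirez',
--     'Steffany Taylor',
--     'credentialing.updates@premera.com',
--     'edna.villareal@findheadway.com',
--     'luis.valdez@findheadway.com',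
--     'katie.cassidy@findheadway.com',
--     'stephani.vasquez@findheadway.com',
--     'gavin.green@findheadway.com',
--     'valorie.reyes@findheadway.com',
--     'amy.huh@findheadway.com',
--     'Zara Aghajanyan',
--     'c.smith@scanhealthplan.com',
--     'b.chan@scanhealthplan.com',
--     'li.lopez@scanhealthplan.com',
--     'a.liu@scanhealthplan.com',
--     'EVo@scanhealthplan.com',
--     'a.vuc@scanhealthplan.com',
--     'mo.davila@scanhealthplan.com',
--     'Carrie Black',
--     'Charlene Frail-McGeever',
--     'Aimee.Kulp@hsc.utah.edu',
-- ]
--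
-- ALLOWED_DOMAINS = [
--     'carelon.com',
--     'findheadway.com',
--     'headway.com',
--     'scanhealthplan.com',
--     'scan.com',
--     'hsc.utah.edu',
--     'utah.edu',
--     'fchn.com',
--     'firstchoicehealth.com',
--     'premera.com',
-- ]
--
-- # ONE combined lookup table, built once at module load: namespaced keys so a
-- # reporter name can never collide with a domain ('r' = reporter key, 'd' = domain key).
-- _ALLOWED_KEYS = {('r', r.lower()) for r in ALLOWED_REPORTERS} | \
--                 {('d', d.lower()) for d in ALLOWED_DOMAINS}
--
--
-- def is_allowed_reporter(email=None, name=None):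
--     # Derive every candidate key this (email, name) pair could match, then do a
--     # single membership pass over the combined table -- no branch chain, no
--     # per-domain suffix loop: the domain key is computed from the email itself.
--     keys = []
--     if email:
--         low = email.lower()
--         keys.append(('r', low))
--         _, sep, dom = low.rpartition('@')
--         if sep:
--             keys.append(('d', dom))
--     if name:
--         keys.append(('r', name.lower()))
--     return any(k in _ALLOWED_KEYS for k in keys)
-- ===== Notes on version B (the rewrite author's own statement) =====
-- stated objective: alternative
-- what changed: B merges reporters and domains into one namespaced-key table built at module load, derives all candidate keys from the input (lowered email, lowered name, and the text after the email's last '@' via rpartition) and answers with a single any-membership pass, replacing A's three-branch chain and per-domain endswith loop.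
import Mathlib
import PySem

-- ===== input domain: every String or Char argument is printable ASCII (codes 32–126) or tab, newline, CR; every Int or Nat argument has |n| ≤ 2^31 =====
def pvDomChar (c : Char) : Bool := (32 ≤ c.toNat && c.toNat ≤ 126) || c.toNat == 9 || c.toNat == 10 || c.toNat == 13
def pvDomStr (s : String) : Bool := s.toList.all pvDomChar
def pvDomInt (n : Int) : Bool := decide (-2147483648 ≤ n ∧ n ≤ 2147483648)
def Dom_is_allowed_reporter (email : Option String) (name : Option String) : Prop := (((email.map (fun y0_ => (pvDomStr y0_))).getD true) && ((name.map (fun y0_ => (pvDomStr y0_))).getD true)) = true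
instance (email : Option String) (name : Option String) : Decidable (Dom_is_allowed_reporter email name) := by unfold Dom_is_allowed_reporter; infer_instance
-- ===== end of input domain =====

-- B merges reporters and domains into one namespaced-key table and answers with a single
-- any-membership pass over keys derived from the input (the domain key computed via rpartition),
-- replacing A's branch chain and per-domain endswith loop; same result, alternative structure.

def pvAllowedReporters : List String := [
  "Kelli-Ann.Bailey@carelon.com",
  "Cindy Bergley",
  "cbergley",
  "Abby Fuller",
  "Tanya Ramirez",
  "Steffany Taylor",
  "credentialing.updates@premera.com",
  "edna.villareal@findheadway.com",
  "luis.valdez@findheadway.com",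
  "katie.cassidy@findheadway.com",
  "stephani.vasquez@findheadway.com",
  "gavin.green@findheadway.com",
  "valorie.reyes@findheadway.com",
  "amy.huh@findheadway.com",
  "Zara Aghajanyan",
  "c.smith@scanhealthplan.com",
  "b.chan@scanhealthplan.com",
  "li.lopez@scanhealthplan.com",
  "a.liu@scanhealthplan.com",
  "EVo@scanhealthplan.com",
  "a.vuc@scanhealthplan.com",
  "mo.davila@scanhealthplan.com",
  "Carrie Black",
  "Charlene Frail-McGeever",
  "Aimee.Kulp@hsc.utah.edu"]

def pvAllowedDomains : List String := [
  "carelon.com",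
  "findheadway.com",
  "headway.com",
  "scanhealthplan.com",
  "scan.com",
  "hsc.utah.edu",
  "utah.edu",
  "fchn.com",
  "firstchoicehealth.com",
  "premera.com"]

-- ===== PORT A =====
def is_allowed_reporter (email : Option String) (name : Option String) : Bool :=
  -- if email and email.lower() in [r.lower() for r in ALLOWED_REPORTERS]: return True
  if (match email with
      | some e => !e.isEmpty && (pvAllowedReporters.map PySem.Str.lower).contains (PySem.Str.lower e)
      | none => false) then true
  -- if name and name.lower() in [r.lower() for r in ALLOWED_REPORTERS]: return True
  else if (match name with
      | some n => !n.isEmpty && (pvAllowedReporters.map PySem.Str.lower).contains (PySem.Str.lower n)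
      | none => false) then true
  -- if email: for domain in ALLOWED_DOMAINS: if email.lower().endswith('@' + domain.lower()): return True
  else match email with
    | some e =>
        if !e.isEmpty then
          pvAllowedDomains.any (fun d => PySem.Str.endswith (PySem.Str.lower e) ("@" ++ PySem.Str.lower d))
        else false
    | none => false

-- ===== PORT B =====
-- _ALLOWED_KEYS = {('r', r.lower()) for r in ALLOWED_REPORTERS} | {('d', d.lower()) for d in ALLOWED_DOMAINS}
def pvAllowedKeys : PySem.Set (String × String) :=
  PySem.Set.union
    (PySem.Set.ofList (pvAllowedReporters.map (fun r => (("r" : String), PySem.Str.lower r))))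
    (PySem.Set.ofList (pvAllowedDomains.map (fun d => (("d" : String), PySem.Str.lower d))))

-- hand port of the tail of low.rpartition('@'); exact whenever '@' occurs in the string
-- (sep is then '@' and this is the text after the LAST '@'), which is the only case B uses it
def pvRpartTail (s : String) : String :=
  String.ofList ((s.toList.reverse.takeWhile (fun c => c ≠ '@')).reverse)

def is_allowed_reporter_alt (email : Option String) (name : Option String) : Bool :=
  -- keys = []; if email: keys.append(('r', low)); if sep: keys.append(('d', dom)); if name: keys.append(('r', name.lower()))
  let emailKeys : List (String × String) :=
    match email with
    | some e =>
        if e.isEmpty then [] else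
          let low := PySem.Str.lower e
          if PySem.Str.isIn "@" low then [(("r" : String), low), (("d" : String), pvRpartTail low)]
          else [(("r" : String), low)]
    | none => []
  let nameKeys : List (String × String) :=
    match name with
    | some n => if n.isEmpty then [] else [(("r" : String), PySem.Str.lower n)]
    | none => []
  -- return any(k in _ALLOWED_KEYS for k in keys)
  (emailKeys ++ nameKeys).any (fun k => PySem.Set.contains pvAllowedKeys k)

-- ===== PRECONDITION & SPEC =====
def Spec_is_allowed_reporter (email : Option String) (name : Option String) (out : Bool) : Prop := out = is_allowed_reporter_alt email name
instance (email : Option String) (name : Option String) (out : Bool) : Decidable (Spec_is_allowed_reporter email name out) := by unfold Spec_is_allowed_reporter; infer_instance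

-- ===== CLAIM (what is proved, stated in full; the proofs are below) =====
def Claim_equal_is_allowed_reporter : Prop := ∀ (email : Option String) (name : Option String), Dom_is_allowed_reporter email name → Spec_is_allowed_reporter email name (is_allowed_reporter email name)

-- ===== LEMMAS AND PROOFS =====

-- the union evaluates to the concatenation of the two key lists (all 35 keys are distinct)
set_option maxRecDepth 4096 in
theorem pv_keys_eq : pvAllowedKeys
    = pvAllowedReporters.map (fun r => (("r" : String), PySem.Str.lower r))
      ++ pvAllowedDomains.map (fun d => (("d" : String), PySem.Str.lower d)) := by decide

theorem pv_mem_rep (x : String) :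
    ((("r" : String), x) ∈ pvAllowedKeys) ↔ x ∈ pvAllowedReporters.map PySem.Str.lower := by
  rw [pv_keys_eq]
  simp [List.mem_map, Prod.ext_iff]

theorem pv_mem_dom (x : String) :
    ((("d" : String), x) ∈ pvAllowedKeys) ↔ x ∈ pvAllowedDomains := by
  rw [pv_keys_eq,
    show pvAllowedDomains.map (fun d => (("d" : String), PySem.Str.lower d))
        = pvAllowedDomains.map (fun d => (("d" : String), d)) from by decide]
  simp [Prod.ext_iff]

theorem pv_key_dom (x : String) :
    PySem.Set.contains pvAllowedKeys (("d" : String), x)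
      = pvAllowedDomains.contains x := by
  rw [Bool.eq_iff_iff, PySem.Set.contains_iff, List.contains_iff_mem]
  exact pv_mem_dom x

theorem pv_key_rep (x : String) :
    PySem.Set.contains pvAllowedKeys (("r" : String), x)
      = (pvAllowedReporters.map PySem.Str.lower).contains x := by
  rw [Bool.eq_iff_iff, PySem.Set.contains_iff, List.contains_iff_mem]
  exact pv_mem_rep x

theorem pv_suffix_at (l d : List Char) (hd : '@' ∉ d) :
    ('@' :: d) <:+ l ↔ ('@' ∈ l ∧ (l.reverse.takeWhile (fun c => c ≠ '@')).reverse = d) := by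
  constructor
  · rintro ⟨t, rfl⟩
    refine ⟨by simp, ?_⟩
    have hall : d.reverse.takeWhile (fun c => c ≠ '@') = d.reverse := by
      rw [List.takeWhile_eq_self_iff]
      intro a ha
      simp only [decide_eq_true_eq]
      rintro rfl
      exact hd (List.mem_reverse.mp ha)
    rw [List.reverse_append, List.reverse_cons, List.append_assoc,
        List.takeWhile_append, hall]
    simp [List.takeWhile_cons_of_neg]
  · rintro ⟨hmem, htail⟩
    have hne : l.reverse.dropWhile (fun c => c ≠ '@') ≠ [] := by
      intro h
      rw [List.dropWhile_eq_nil_iff] at h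
      have := h '@' (List.mem_reverse.mpr hmem)
      simp at this
    obtain ⟨c, rest, hcr⟩ := List.exists_cons_of_ne_nil hne
    have hc : c = '@' := by
      have hhead := List.head_dropWhile_not (fun c => c ≠ '@') hne
      simp only [hcr, List.head_cons] at hhead
      simpa using hhead
    have hl : l.reverse = l.reverse.takeWhile (fun c => c ≠ '@') ++ '@' :: rest := by
      conv_lhs => rw [← List.takeWhile_append_dropWhile (p := fun c => c ≠ '@') (l := l.reverse)]
      rw [hcr, hc]
    have h2 := congrArg List.reverse hl
    rw [List.reverse_reverse] at h2
    rw [List.reverse_append, List.reverse_cons, htail, List.append_assoc,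
        List.singleton_append] at h2
    exact ⟨rest.reverse, h2.symm⟩

theorem pv_isIn_at (s : String) : PySem.Str.isIn "@" s = true ↔ '@' ∈ s.toList := by
  rw [PySem.Str.isIn_iff_infix, show ("@" : String).toList = ['@'] from by decide]
  constructor
  · rintro ⟨u, v, huv⟩
    rw [← huv]; simp
  · intro h
    obtain ⟨u, v, huv⟩ := List.append_of_mem h
    exact ⟨u, v, by simp [huv]⟩

theorem pv_endswith_domain (s d : String) (hd : '@' ∉ d.toList) :
    PySem.Str.endswith s ("@" ++ d)
      = (PySem.Str.isIn "@" s &&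
          decide ((s.toList.reverse.takeWhile (fun c => c ≠ '@')).reverse = d.toList)) := by
  rw [Bool.eq_iff_iff]
  simp only [PySem.Str.endswith_eq, Bool.and_eq_true, decide_eq_true_iff]
  rw [PySem.Chars.endswith_iff,
      show ("@" ++ d).toList = '@' :: d.toList from by
        rw [String.toList_append, show ("@" : String).toList = ['@'] from by decide]; rfl,
      pv_suffix_at s.toList d.toList hd, pv_isIn_at]

theorem pv_domain_eq (s : String) :
    pvAllowedDomains.any (fun d => PySem.Str.endswith s ("@" ++ PySem.Str.lower d))
      = (PySem.Str.isIn "@" s && PySem.Set.contains pvAllowedKeys (("d" : String), pvRpartTail s)) := by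
  have hlow : ∀ d ∈ pvAllowedDomains, PySem.Str.lower d = d := by decide
  have hat : ∀ d ∈ pvAllowedDomains, '@' ∉ d.toList := by decide
  rw [pv_key_dom, Bool.eq_iff_iff, List.any_eq_true, Bool.and_eq_true]
  constructor
  · rintro ⟨d, hmem, hend⟩
    rw [hlow d hmem, pv_endswith_domain s d (hat d hmem), Bool.and_eq_true,
        decide_eq_true_iff] at hend
    refine ⟨hend.1, ?_⟩
    have hEq : pvRpartTail s = d := String.ext (by simpa [pvRpartTail] using hend.2)
    rw [hEq]
    simp only [List.contains_iff_mem]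
    exact hmem
  · rintro ⟨hin, hcont⟩
    have hmem : pvRpartTail s ∈ pvAllowedDomains := by
      simpa only [List.contains_iff_mem] using hcont
    refine ⟨pvRpartTail s, hmem, ?_⟩
    rw [hlow _ hmem, pv_endswith_domain s _ (hat _ hmem), Bool.and_eq_true,
        decide_eq_true_iff]
    exact ⟨hin, by simp [pvRpartTail]⟩

-- ===== VERDICT (by name: the statement is the Claim_ definition above) =====
theorem is_allowed_reporter_spec : Claim_equal_is_allowed_reporter := by
  intro email name _
  show is_allowed_reporter email name = is_allowed_reporter_alt email name
  unfold is_allowed_reporter is_allowed_reporter_alt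
  have hnk : (match name with
      | some n => !n.isEmpty && (pvAllowedReporters.map PySem.Str.lower).contains (PySem.Str.lower n)
      | none => false)
      = (match name with
        | some n => if n.isEmpty then ([] : List (String × String)) else [(("r" : String), PySem.Str.lower n)]
        | none => []).any (fun k => PySem.Set.contains pvAllowedKeys k) := by
    cases name with
    | none => rfl
    | some n => cases h : n.isEmpty <;> simp [h, pv_mem_rep]
  cases email with
  | none =>
      simp only [List.nil_append]
      rw [← hnk]
      cases hb : (match name with
        | some n => !n.isEmpty && (pvAllowedReporters.map PySem.Str.lower).contains (PySem.Str.lower n)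
        | none => false) <;> simp [hb]
  | some e =>
      cases h : e.isEmpty with
      | true =>
          simp only [h, Bool.not_true, Bool.false_and, Bool.false_eq_true, reduceIte,
            List.nil_append]
          rw [← hnk]
          cases hb : (match name with
            | some n => !n.isEmpty && (pvAllowedReporters.map PySem.Str.lower).contains (PySem.Str.lower n)
            | none => false) <;> simp [hb]
      | false =>
          simp only [h, Bool.not_false, Bool.true_and, Bool.false_eq_true, reduceIte,
            List.any_append]
          rw [← hnk, pv_domain_eq]
          cases hin : PySem.Str.isIn "@" (PySem.Str.lower e) <;>
            simp only [hin, Bool.false_and, Bool.true_and, Bool.false_eq_true, reduceIte,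
              List.any_cons, List.any_nil, Bool.or_false, pv_key_rep, pv_key_dom] <;>
          cases hrep : (pvAllowedReporters.map PySem.Str.lower).contains (PySem.Str.lower e) <;>
          cases hb : (match name with
            | some n => !n.isEmpty && (pvAllowedReporters.map PySem.Str.lower).contains (PySem.Str.lower n)
            | none => false) <;>
          cases hkd : pvAllowedDomains.contains (pvRpartTail (PySem.Str.lower e)) <;>
            simp [hrep, hb, hkd]
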